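-- pv_equiv track=rewrite | github.com/Hisham-Assana/AI-Projects | Theorem Prover/Theorem_Prover.py | lastOP
-- ===== SOURCE A (Python) =====
-- def lastOP(Slist):
--     Op = ["&","|","!"]
--     OpLoc = {
--         "|" : [] ,
--         "&" : [] ,
--         "!" : []
--     }
--     ParanCount = 0
--     IndexCount = 0
--     for token in Slist:
--         if (token in Op) and (ParanCount == 0):
--             OpLoc[token].append(IndexCount)
--             IndexCount += 1
--         else:
--             if Slist[IndexCount] == "(":
--                 ParanCount += 1
--             if Slist[IndexCount] == ")":
--                 ParanCount -= 1
--             IndexCount += 1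
--     if len(OpLoc["|"])  != 0:
--         return (OpLoc["|"][0], "|")
--     elif len(OpLoc["&"]) != 0:
--         return (OpLoc["&"][0], "&")
--     elif len(OpLoc["!"]) != 0:
--         return (OpLoc["!"][0], "!")
-- ===== SOURCE B (Python) =====
-- def lastOP(Slist):
--     def find_first(op):
--         depth = 0
--         for i, token in enumerate(Slist):
--             if token == op and depth == 0:
--                 return i
--             if token == "(":
--                 depth += 1
--             elif token == ")":
--                 depth -= 1
--         return None
--     for op in ("|", "&", "!"):
--         r = find_first(op)
--         if r is not None:
--             return (r, op)
--     return None
-- ===== Notes on version B (the rewrite author's own statement) =====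
-- stated objective: simpler
-- what changed: Replaced A's single pass that accumulates every top-level operator position in a dict of lists with a short-circuiting helper find_first(op) scanning with a local depth counter, called once per operator in precedence order.
import Mathlib
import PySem

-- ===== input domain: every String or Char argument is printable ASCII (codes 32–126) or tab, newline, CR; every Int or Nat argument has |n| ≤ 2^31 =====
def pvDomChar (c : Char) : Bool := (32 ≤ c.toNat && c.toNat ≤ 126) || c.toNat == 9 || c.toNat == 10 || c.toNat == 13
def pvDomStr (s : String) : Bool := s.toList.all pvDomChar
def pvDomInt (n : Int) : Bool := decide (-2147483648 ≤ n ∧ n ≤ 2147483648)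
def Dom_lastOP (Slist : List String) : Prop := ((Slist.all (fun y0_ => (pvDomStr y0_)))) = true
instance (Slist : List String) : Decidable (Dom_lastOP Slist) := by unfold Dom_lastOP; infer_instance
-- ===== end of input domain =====

-- B replaces A's dict-of-lists accumulation pass by three short-circuiting depth-counting scans, one per operator in precedence order (objective: simpler).

-- ===== PORT A =====
-- the 'for token in Slist' loop of A, carrying (OpLoc, ParanCount, IndexCount);
-- Slist[IndexCount] is ported with pyGetD (IndexCount always equals the current
-- position, so the Python access never raises and the default is never used)
def lastOPLoop (Slist : List String) : List String → PySem.Dict String (List Int) → Int → Int → PySem.Dict String (List Int)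
  | [], OpLoc, _, _ => OpLoc
  | token :: rest, OpLoc, ParanCount, IndexCount =>
    if token ∈ (["&", "|", "!"] : List String) ∧ ParanCount = 0 then
      lastOPLoop Slist rest (OpLoc.modify token [] (fun l => l ++ [IndexCount])) ParanCount (IndexCount + 1)
    else
      let p1 := if PySem.List.pyGetD Slist IndexCount "" = "(" then ParanCount + 1 else ParanCount
      let p2 := if PySem.List.pyGetD Slist IndexCount "" = ")" then p1 - 1 else p1
      lastOPLoop Slist rest OpLoc p2 (IndexCount + 1)

-- OpLoc[op][0] after the guard len ≠ 0: the list is nonempty, pyGetD default unreachable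
def lastOP (Slist : List String) : Option (Int × String) :=
  let OpLoc := lastOPLoop Slist Slist (PySem.Dict.ofList [("|", []), ("&", []), ("!", [])]) 0 0
  if (OpLoc.getD "|" []).length ≠ 0 then
    some (PySem.List.pyGetD (OpLoc.getD "|" []) 0 0, "|")
  else if (OpLoc.getD "&" []).length ≠ 0 then
    some (PySem.List.pyGetD (OpLoc.getD "&" []) 0 0, "&")
  else if (OpLoc.getD "!" []).length ≠ 0 then
    some (PySem.List.pyGetD (OpLoc.getD "!" []) 0 0, "!")
  else
    none

-- ===== PORT B =====
-- Source B's find_first(op): enumerate loop with a local depth counter and early return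
def findFirstAux (op : String) : List String → Int → Int → Option Int
  | [], _, _ => none
  | token :: rest, depth, i =>
    if token = op ∧ depth = 0 then some i
    else if token = "(" then findFirstAux op rest (depth + 1) (i + 1)
    else if token = ")" then findFirstAux op rest (depth - 1) (i + 1)
    else findFirstAux op rest depth (i + 1)

-- Source B's for-loop over ("|", "&", "!") with early return, unrolled
def lastOP_alt (Slist : List String) : Option (Int × String) :=
  match findFirstAux "|" Slist 0 0 with
  | some r => some (r, "|")
  | none =>
    match findFirstAux "&" Slist 0 0 with
    | some r => some (r, "&")
    | none =>
      match findFirstAux "!" Slist 0 0 with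
      | some r => some (r, "!")
      | none => none

-- ===== PRECONDITION & SPEC =====
def Spec_lastOP (Slist : List String) (out : Option (Int × String)) : Prop := out = lastOP_alt Slist
instance (Slist : List String) (out : Option (Int × String)) : Decidable (Spec_lastOP Slist out) := by unfold Spec_lastOP; infer_instance

-- ===== CLAIM (what is proved, stated in full; the proofs are below) =====
def Claim_equal_lastOP : Prop := ∀ (Slist : List String), Dom_lastOP Slist → Spec_lastOP Slist (lastOP Slist)

-- ===== LEMMAS AND PROOFS =====

-- proof-side characterisation: the top-level positions of op, scanning from index i at depth d
def collectOp (op : String) : List String → Int → Int → List Int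
  | [], _, _ => []
  | token :: rest, d, i =>
    if d = 0 ∧ token = op then i :: collectOp op rest d (i + 1)
    else
      let d' := if token = "(" then d + 1 else if token = ")" then d - 1 else d
      collectOp op rest d' (i + 1)

lemma pyGetD_drop_cons (Slist : List String) (n : Nat) (t : String) (rest : List String)
    (h : Slist.drop n = t :: rest) : PySem.List.pyGetD Slist (n : Int) "" = t := by
  have h0 : Slist[n]? = some t := by
    have h1 : (List.drop n Slist)[0]? = Slist[n + 0]? := List.getElem?_drop
    simp only [Nat.add_zero] at h1
    rw [← h1, h]
    rfl
  simp [PySem.List.pyGetD_natCast, List.getD, h0]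

lemma drop_succ_of_drop_cons (Slist : List String) (n : Nat) (t : String) (rest : List String)
    (h : Slist.drop n = t :: rest) : Slist.drop (n + 1) = rest := by
  have h1 : List.drop 1 (List.drop n Slist) = List.drop (n + 1) Slist := List.drop_drop
  rw [← h1, h]
  rfl

lemma loopA_getD (Slist : List String) (op : String)
    (hop : op = "|" ∨ op = "&" ∨ op = "!") :
    ∀ (toks : List String) (n : Nat) (d : Int) (D : PySem.Dict String (List Int)),
      Slist.drop n = toks →
      (lastOPLoop Slist toks D d (n : Int)).getD op []
        = D.getD op [] ++ collectOp op toks d (n : Int) := by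
  intro toks
  induction toks with
  | nil => intro n d D _; simp [lastOPLoop, collectOp]
  | cons token rest ih =>
    intro n d D hdrop
    have htok : PySem.List.pyGetD Slist (n : Int) "" = token := pyGetD_drop_cons Slist n token rest hdrop
    have hrest : Slist.drop (n + 1) = rest := drop_succ_of_drop_cons Slist n token rest hdrop
    have hnext : ((n : Int) + 1) = ((n + 1 : Nat) : Int) := by push_cast; ring
    by_cases hc : token ∈ (["&", "|", "!"] : List String) ∧ d = 0
    · rw [lastOPLoop, if_pos hc]
      by_cases heq : token = op
      · subst heq
        rw [hnext, ih (n + 1) d _ hrest]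
        have hcol : collectOp token (token :: rest) d (n : Int)
            = (n : Int) :: collectOp token rest d ((n : Int) + 1) := by
          rw [collectOp, if_pos ⟨hc.2, rfl⟩]
        rw [hcol, PySem.Dict.getD_modify_self, hnext]
        simp
      · have hmem : token = "&" ∨ token = "|" ∨ token = "!" := by simpa using hc.1
        have hpar : token ≠ "(" ∧ token ≠ ")" := by
          rcases hmem with h | h | h <;> subst h <;> exact ⟨by decide, by decide⟩
        have hcol : collectOp op (token :: rest) d (n : Int)
            = collectOp op rest d ((n : Int) + 1) := by
          rw [collectOp, if_neg (by tauto)]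
          simp [hpar.1, hpar.2]
        rw [hcol, hnext, ih (n + 1) d _ hrest, PySem.Dict.getD_modify]
        rw [if_neg (fun h => heq h.symm)]
    · rw [lastOPLoop, if_neg hc]
      have hnotop : ¬ (d = 0 ∧ token = op) := by
        rintro ⟨hd, hte⟩
        exact hc ⟨by subst hte; rcases hop with h | h | h <;> simp [h], hd⟩
      have hcol : collectOp op (token :: rest) d (n : Int)
          = collectOp op rest (if token = "(" then d + 1 else if token = ")" then d - 1 else d) ((n : Int) + 1) := by
        rw [collectOp, if_neg hnotop]
      rw [hcol, htok, hnext]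
      by_cases hl : token = "("
      · subst hl
        simpa using ih (n + 1) (d + 1) D hrest
      · by_cases hr : token = ")"
        · subst hr
          simpa using ih (n + 1) (d - 1) D hrest
        · simp only [if_neg hl, if_neg hr]
          exact ih (n + 1) d D hrest

lemma findFirstAux_eq_head (op : String) :
    ∀ (toks : List String) (d i : Int),
      findFirstAux op toks d i = (collectOp op toks d i).head? := by
  intro toks
  induction toks with
  | nil => intro d i; simp [findFirstAux, collectOp]
  | cons token rest ih =>
    intro d i
    by_cases hc : token = op ∧ d = 0
    · rw [findFirstAux, if_pos hc, collectOp, if_pos ⟨hc.2, hc.1⟩]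
      simp
    · have hnotop : ¬ (d = 0 ∧ token = op) := fun h => hc ⟨h.2, h.1⟩
      rw [findFirstAux, if_neg hc, collectOp, if_neg hnotop]
      by_cases hl : token = "("
      · subst hl
        rw [if_pos rfl]
        simpa using ih (d + 1) (i + 1)
      · by_cases hr : token = ")"
        · subst hr
          rw [if_neg hl, if_pos rfl]
          simpa using ih (d - 1) (i + 1)
        · rw [if_neg hl, if_neg hr]
          simp only [if_neg hl, if_neg hr]
          exact ih d (i + 1)

lemma dict_final (Slist : List String) (op : String)
    (hop : op = "|" ∨ op = "&" ∨ op = "!") :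
    (lastOPLoop Slist Slist (PySem.Dict.ofList [("|", []), ("&", []), ("!", [])]) 0 0).getD op []
      = collectOp op Slist 0 0 := by
  have h := loopA_getD Slist op hop Slist 0 0 (PySem.Dict.ofList [("|", []), ("&", []), ("!", [])]) (by simp)
  have hinit : (PySem.Dict.ofList [("|", []), ("&", []), ("!", [])] : PySem.Dict String (List Int)).getD op [] = ([] : List Int) := by
    rcases hop with h | h | h <;> subst h <;> rfl
  simpa [hinit] using h

-- ===== VERDICT (by name: the statement is the Claim_ definition above) =====
theorem lastOP_spec : Claim_equal_lastOP := by
  intro Slist _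
  unfold Spec_lastOP
  simp only [lastOP, lastOP_alt,
    dict_final Slist "|" (Or.inl rfl),
    dict_final Slist "&" (Or.inr (Or.inl rfl)),
    dict_final Slist "!" (Or.inr (Or.inr rfl)),
    findFirstAux_eq_head "|",
    findFirstAux_eq_head "&",
    findFirstAux_eq_head "!"]
  cases h1 : collectOp "|" Slist 0 0 <;>
    cases h2 : collectOp "&" Slist 0 0 <;>
      cases h3 : collectOp "!" Slist 0 0 <;>
        simp [PySem.List.pyGetD_zero_cons]
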